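-- pv_equiv track=rewrite | github.com/tasker-systems/storyteller | tools/narrative-data/src/narrative_data/tome/propagation.py | build_incoming_index
-- ===== SOURCE A (Python) =====
-- from typing import TYPE_CHECKING, Any
--
-- def build_incoming_index(graph_data: dict[str, Any]) -> dict[str, list[dict[str, Any]]]:
--     """Build a reverse lookup: to_axis → list of incoming edges.
--
--     Args:
--         graph_data: The dict returned by :func:`load_graph`.  Must contain
--             an ``"edges"`` key whose value is a list of edge dicts.  Each
--             edge dict must have at least ``"from_axis"`` and ``"to_axis"``.
--
--     Returns:
--         A dict mapping each target axis slug to the list of all edges that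
--         point *to* it.  Axes that appear only as sources are absent from the
--         index.
--     """
--     index: dict[str, list[dict[str, Any]]] = {}
--     for edge in graph_data.get("edges", []):
--         to_axis = edge["to_axis"]
--         if to_axis not in index:
--             index[to_axis] = []
--         index[to_axis].append(edge)
--     return index
-- ===== SOURCE B (Python) =====
-- def build_incoming_index(graph_data):
--     """Build a reverse lookup: to_axis -> list of incoming edges.
--
--     Alternative strategy: collect the target axes in first-occurrence order,
--     then build each bucket with one filtering pass per distinct target.
--     """
--     edges = graph_data.get("edges", [])
--     order = dict.fromkeys(edge["to_axis"] for edge in edges)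
--     return {t: [e for e in edges if e["to_axis"] == t] for t in order}
-- ===== Notes on version B (the rewrite author's own statement) =====
-- stated objective: alternative
-- what changed: Replaces the single-pass dict accumulation with a two-phase grouping: dedup the target keys in first-occurrence order, then build each bucket by filtering the edge list per key.
import Mathlib
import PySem

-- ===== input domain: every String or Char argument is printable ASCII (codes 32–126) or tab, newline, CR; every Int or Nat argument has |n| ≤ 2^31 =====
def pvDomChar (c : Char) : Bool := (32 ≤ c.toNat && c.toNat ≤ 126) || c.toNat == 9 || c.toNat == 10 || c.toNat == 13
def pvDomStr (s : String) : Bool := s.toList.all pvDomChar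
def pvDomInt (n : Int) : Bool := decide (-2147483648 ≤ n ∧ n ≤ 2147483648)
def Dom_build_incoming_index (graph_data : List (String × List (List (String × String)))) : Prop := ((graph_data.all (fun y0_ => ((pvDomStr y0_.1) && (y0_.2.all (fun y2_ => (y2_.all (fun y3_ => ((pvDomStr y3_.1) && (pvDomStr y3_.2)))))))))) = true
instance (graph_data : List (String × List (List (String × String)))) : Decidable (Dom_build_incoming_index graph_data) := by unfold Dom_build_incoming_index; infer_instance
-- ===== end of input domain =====

-- ===== PORT A =====
-- B re-groups the edges by distinct target key instead of accumulating a dict in one pass (objective: alternative).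

-- shared lookup of edge["to_axis"] as B reads it (under Pre_ the key is always present, so the getD "" default is never used)
def pvKey (e : List (String × String)) : String := ((PySem.Dict.mk e).get? "to_axis").getD ""

def build_incoming_index (graph_data : List (String × List (List (String × String)))) : List (String × List (List (String × String))) :=
  let edges := (PySem.Dict.mk graph_data).getD "edges" []
  (edges.foldl (fun index edge =>
      match (PySem.Dict.mk edge).get? "to_axis" with
      | none => index  -- Python raises KeyError here; excluded by Pre_
      | some to_axis =>
        let index' := if index.contains to_axis then index else index.insert to_axis []
        index'.modify to_axis [] (fun l => l ++ [edge])) PySem.Dict.empty).items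

-- ===== PORT B =====
def build_incoming_index_alt (graph_data : List (String × List (List (String × String)))) : List (String × List (List (String × String))) :=
  let edges := (PySem.Dict.mk graph_data).getD "edges" []
  let order := PySem.List.dedup (edges.map pvKey)
  order.map (fun t => (t, edges.filter (fun e => pvKey e == t)))

-- ===== PRECONDITION & SPEC =====
-- Pre_: every edge in the "edges" list carries a "to_axis" key; otherwise Python A raises KeyError (so does B).
def Pre_build_incoming_index (graph_data : List (String × List (List (String × String)))) : Prop :=
  ∀ p ∈ graph_data, p.1 = "edges" → ∀ e ∈ p.2, "to_axis" ∈ e.map Prod.fst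
instance (graph_data : List (String × List (List (String × String)))) : Decidable (Pre_build_incoming_index graph_data) := by unfold Pre_build_incoming_index; infer_instance
def pvWitness_build_incoming_index : (List (String × List (List (String × String)))) :=
  [("edges", [[("from_axis", "a"), ("to_axis", "b")], [("from_axis", "b"), ("to_axis", "b")]])]
def Spec_build_incoming_index (graph_data : List (String × List (List (String × String)))) (out : List (String × List (List (String × String)))) : Prop := out = build_incoming_index_alt graph_data
instance (graph_data : List (String × List (List (String × String)))) (out : List (String × List (List (String × String)))) : Decidable (Spec_build_incoming_index graph_data out) := by unfold Spec_build_incoming_index; infer_instance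

-- ===== CLAIM (what is proved, stated in full; the proofs are below) =====
def Claim_equal_build_incoming_index : Prop := ∀ (graph_data : List (String × List (List (String × String)))), Dom_build_incoming_index graph_data → Pre_build_incoming_index graph_data → Spec_build_incoming_index graph_data (build_incoming_index graph_data)

-- ===== LEMMAS AND PROOFS =====

-- a fresh-key insert followed by an overwriting insert collapses to one insert
theorem pv_insert_insert {κ ν : Type} [BEq κ] [LawfulBEq κ] (d : PySem.Dict κ ν) (t : κ) (v w : ν)
    (h : d.contains t = false) : (d.insert t v).insert t w = d.insert t w := by
  have hmem : ∀ p ∈ d.items, (p.1 == t) = false := by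
    intro p hp
    cases hbe : p.1 == t
    · rfl
    · exfalso
      have hc : d.contains t = true := by
        unfold PySem.Dict.contains
        exact List.any_eq_true.mpr ⟨p, hp, hbe⟩
      rw [hc] at h
      cases h
  have h1 : d.insert t v = PySem.Dict.mk (d.items ++ [(t, v)]) := by
    simp [PySem.Dict.insert, h]
  have h2 : (PySem.Dict.mk (d.items ++ [(t, v)])).contains t = true := by
    simp [PySem.Dict.contains]
  have h3 : d.insert t w = PySem.Dict.mk (d.items ++ [(t, w)]) := by
    simp [PySem.Dict.insert, h]
  have h4 : d.items.map (fun p => if p.1 == t then (t, w) else p) = d.items := by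
    conv_rhs => rw [← List.map_id d.items]
    apply List.map_congr_left
    intro p hp
    simp [hmem p hp]
  rw [h1, h3]
  simp [PySem.Dict.insert, h2, List.map_append, h4]

-- A's loop body equals one modify-with-default-append
theorem pv_step_eq {κ ν : Type} [BEq κ] [LawfulBEq κ] (d : PySem.Dict κ (List ν)) (t : κ) (e : ν) :
    (if d.contains t then d else d.insert t []).modify t [] (fun l => l ++ [e])
      = d.modify t [] (fun l => l ++ [e]) := by
  by_cases h : d.contains t = true
  · simp [h]
  · have h' : d.contains t = false := by simpa using h
    rw [if_neg (by simp [h'])]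
    simp only [PySem.Dict.modify, PySem.Dict.getD_insert_self,
      PySem.Dict.getD_of_not_contains _ _ h', List.nil_append]
    exact pv_insert_insert d t [] [e] h'

-- under Pre_, A's fold is the modify-append fold keyed by pvKey
theorem pv_fold_eq (edges : List (List (String × String))) (d : PySem.Dict String (List (List (String × String))))
    (h : ∀ e ∈ edges, "to_axis" ∈ e.map Prod.fst) :
    edges.foldl (fun index edge =>
      match (PySem.Dict.mk edge).get? "to_axis" with
      | none => index
      | some to_axis =>
        let index' := if index.contains to_axis then index else index.insert to_axis []
        index'.modify to_axis [] (fun l => l ++ [edge])) d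
    = edges.foldl (fun index edge => index.modify (pvKey edge) [] (fun l => l ++ [edge])) d := by
  induction edges generalizing d with
  | nil => rfl
  | cons e es ih =>
    have he : "to_axis" ∈ e.map Prod.fst := h e (by simp)
    have hsome : ((PySem.Dict.mk e).get? "to_axis").isSome := by
      rcases Option.eq_none_or_eq_some ((PySem.Dict.mk e).get? "to_axis") with hn | ⟨v, hv⟩
      · exfalso
        have hmem := (PySem.Dict.get?_eq_none_iff_not_mem_keys (PySem.Dict.mk e) "to_axis").mp hn
        rw [PySem.Dict.keys_mk] at hmem
        exact hmem he
      · simp [hv]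
    obtain ⟨v, hv⟩ := Option.isSome_iff_exists.mp hsome
    have hkey : pvKey e = v := by simp [pvKey, hv]
    simp only [List.foldl_cons, hv, hkey]
    rw [pv_step_eq]
    exact ih _ (fun x hx => h x (by simp [hx]))

-- a Nodup dict is exactly its keys paired with their looked-up values
theorem pv_items_eq_keys_map {κ ν : Type} [BEq κ] [LawfulBEq κ] (d : PySem.Dict κ ν) (dflt : ν)
    (h : d.keys.Nodup) : d.items = d.keys.map (fun k => (k, d.getD k dflt)) := by
  have h1 : d.keys.map (fun k => (k, d.getD k dflt)) = d.items.map (fun p => (p.1, d.getD p.1 dflt)) := by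
    simp [PySem.Dict.keys, List.map_map, Function.comp]
  rw [h1]
  conv_lhs => rw [← List.map_id d.items]
  apply List.map_congr_left
  intro p hp
  have hv := PySem.Dict.getD_of_mem_items d (k := p.1) (v := p.2) (by simpa using hp) h dflt
  simp [hv]

-- the whole equation, stated over a plain edges list
theorem pv_main (edges : List (List (String × String)))
    (h : ∀ e ∈ edges, "to_axis" ∈ e.map Prod.fst) :
    (edges.foldl (fun index edge =>
      match (PySem.Dict.mk edge).get? "to_axis" with
      | none => index
      | some to_axis =>
        let index' := if index.contains to_axis then index else index.insert to_axis []
        index'.modify to_axis [] (fun l => l ++ [edge])) PySem.Dict.empty).items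
    = (PySem.List.dedup (edges.map pvKey)).map (fun t => (t, edges.filter (fun e => pvKey e == t))) := by
  rw [pv_fold_eq edges PySem.Dict.empty h]
  set D := edges.foldl (fun index edge => index.modify (pvKey edge) [] (fun l => l ++ [edge])) PySem.Dict.empty with hD
  have hkeys : D.keys = PySem.Set.ofList (edges.map pvKey) := by
    rw [hD, PySem.Dict.keys_foldl_modify_key edges pvKey [] (fun _ e => fun l => l ++ [e]) PySem.Dict.empty,
      PySem.Dict.keys_empty]
    rfl
  have hnodup : D.keys.Nodup := by
    rw [hD]
    exact PySem.Dict.nodup_keys_foldl_modify_key edges pvKey [] (fun _ e => fun l => l ++ [e]) PySem.Dict.empty PySem.Dict.nodup_keys_empty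
  have hgetD : ∀ c, D.getD c [] = edges.filter (fun e => pvKey e == c) := by
    intro c
    have hmap : D = (edges.map (fun e => (pvKey e, e))).foldl (fun d p => d.modify p.1 [] (fun l => l ++ [p.2])) PySem.Dict.empty := by
      rw [hD, List.foldl_map]
    rw [hmap, PySem.Dict.getD_foldl_modify_append]
    simp [List.filter_map, List.map_map, Function.comp_def]
  rw [pv_items_eq_keys_map D [] hnodup, hkeys, PySem.List.dedup_eq_ofList]
  apply List.map_congr_left
  intro k _
  rw [hgetD]

-- Pre_ gives the per-edge key fact for the list the ports actually iterate
theorem pv_pre_edges (g : List (String × List (List (String × String))))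
    (hpre : Pre_build_incoming_index g) :
    ∀ e ∈ (PySem.Dict.mk g).getD "edges" [], "to_axis" ∈ e.map Prod.fst := by
  intro e he
  simp only [PySem.Dict.getD, PySem.Dict.get?] at he
  cases hf : List.find? (fun p => p.1 == "edges") (PySem.Dict.mk g).items with
  | none => rw [hf] at he; simp at he
  | some pr =>
    rw [hf] at he
    simp only [Option.map_some, Option.getD_some] at he
    have hmem : pr ∈ g := List.mem_of_find?_eq_some hf
    have hkey : pr.1 = "edges" := by
      have := List.find?_some hf
      simpa using this
    exact hpre pr hmem hkey e he

-- ===== VERDICT (by name: the statement is the Claim_ definition above) =====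
theorem build_incoming_index_spec : Claim_equal_build_incoming_index := by
  intro graph_data _ hpre
  unfold Spec_build_incoming_index
  exact pv_main ((PySem.Dict.mk graph_data).getD "edges" []) (pv_pre_edges graph_data hpre)
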